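-- pv_equiv track=rewrite | github.com/joshanashakya/dissertation | workspace/dataset/java-python/GeeksForGeeks/4458/A/2.py | countStrings
-- ===== SOURCE A (Python) =====
-- def countStrings(s):
--
--     # Variable to store the final result
--     sum = 1
--
--     # Loop iterating through string
--     for i in range(len(s)):
--
--         # If '$' is present at the even
--         # position in the string
--         if (i % 2 == 0 and s[i] == '$'):
--
--             #'sum' is multiplied by 21
--             sum *= 21
--
--         # If '$' is present at the odd
--         # position in the string
--         elif(s[i] == '$'):
--
--             # 'sum' is multiplied by 5
--             sum *= 5
--
--     return sum
-- ===== SOURCE B (Python) =====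
-- def countStrings(s):
--     even = s[::2].count('$')
--     odd = s[1::2].count('$')
--     return 21 ** even * 5 ** odd
-- ===== Notes on version B (the rewrite author's own statement) =====
-- stated objective: simpler
-- what changed: Replaces the per-character branching running product with a count-then-exponentiate closed form: slice out the even- and odd-position characters (s[::2], s[1::2]), count the marker character in each slice, and return 21**even * 5**odd.
import Mathlib
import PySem

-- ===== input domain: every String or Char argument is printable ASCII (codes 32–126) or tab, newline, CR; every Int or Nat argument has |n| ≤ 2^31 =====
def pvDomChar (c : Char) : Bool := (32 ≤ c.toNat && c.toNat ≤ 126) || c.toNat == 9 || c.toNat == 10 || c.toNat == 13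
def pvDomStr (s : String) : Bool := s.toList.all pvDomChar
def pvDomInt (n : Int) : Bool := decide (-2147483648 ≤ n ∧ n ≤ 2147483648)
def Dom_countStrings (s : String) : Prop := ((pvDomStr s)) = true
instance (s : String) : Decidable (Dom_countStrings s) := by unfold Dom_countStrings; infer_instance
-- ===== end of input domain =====

-- B replaces A's per-character branching running product by counting '$' in the even-
-- and odd-position slices and returning the closed form 21^even * 5^odd (simpler).

-- ===== PORT A =====
def countStrings (s : String) : Int :=
  (PySem.List.pyRange 0 (PySem.Str.len s) 1).foldl
    (fun sum i =>
      if PySem.Int.mod i 2 == 0 && PySem.Str.pyGet? s i == some '$' then sum * 21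
      else if PySem.Str.pyGet? s i == some '$' then sum * 5
      else sum) 1

-- ===== PORT B =====
-- string slicing/counting ported on the code-point list (PySem.Chars view: exact)
def countStrings_alt (s : String) : Int :=
  let even := ((PySem.List.slice? s.toList none none 2).getD []).count '$'
  let odd := ((PySem.List.slice? s.toList (some 1) none 2).getD []).count '$'
  (21 : Int) ^ even * (5 : Int) ^ odd

-- ===== PRECONDITION & SPEC =====
def Spec_countStrings (s : String) (out : Int) : Prop := out = countStrings_alt s
instance (s : String) (out : Int) : Decidable (Spec_countStrings s out) := by unfold Spec_countStrings; infer_instance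

-- ===== CLAIM (what is proved, stated in full; the proofs are below) =====
def Claim_equal_countStrings : Prop := ∀ (s : String), Dom_countStrings s → Spec_countStrings s (countStrings s)

-- ===== LEMMAS AND PROOFS =====

def every2 {α : Type} : List α → List α
  | [] => []
  | [a] => [a]
  | a :: _ :: t => a :: every2 t

theorem filterMap_even {α : Type} (l : List α) :
    List.filterMap (fun k => l[2*k]?) (List.range ((l.length+1)/2)) = every2 l := by
  induction l using every2.induct with
  | case1 => simp [every2]
  | case2 a => simp [every2]
  | case3 a b t ih =>
      have hlen : ((a :: b :: t).length + 1)/2 = (t.length+1)/2 + 1 := by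
        simp [List.length_cons]; omega
      rw [hlen, List.range_succ_eq_map, List.filterMap_cons, List.filterMap_map]
      simp only [Nat.mul_zero, List.getElem?_cons_zero]
      have : (fun k => (a :: b :: t)[2*(k+1)]?) = (fun k => t[2*k]?) := by
        funext k
        have h2 : 2*(k+1) = 2*k + 1 + 1 := by omega
        rw [h2]; simp
      simp only [Function.comp_def, this, ih, every2]

theorem slice?_step2_evens {α : Type} (l : List α) :
    PySem.List.slice? l none none 2 = some (every2 l) := by
  rw [PySem.List.slice?]
  simp only [PySem.List.sliceIndices]
  norm_num
  have hc : (if 0 < l.length then (((l.length : Int) + 2 - 1) / 2).toNat else 0)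
      = (l.length + 1) / 2 := by split <;> omega
  have hf : (fun x : Nat => l[(2 * (x : Int)).toNat]?) = (fun x => l[2 * x]?) := by
    funext x
    simp only [show (2 * (x : Int)).toNat = 2 * x by omega]
  rw [hc, hf, filterMap_even]

theorem slice?_step2_odds {α : Type} (l : List α) :
    PySem.List.slice? l (some 1) none 2 = some (every2 l.tail) := by
  rw [PySem.List.slice?]
  simp only [PySem.List.sliceIndices]
  norm_num
  cases l with
  | nil => norm_num [every2]
  | cons a t =>
      have hc : (if 1 < (a :: t).length then
          (((a :: t).length - min 1 ((a :: t).length : Int) + 2 - 1) / 2).toNat else 0)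
          = (t.length + 1) / 2 := by simp [List.length_cons]; split <;> omega
      have hf : (fun x : Nat => (a :: t)[(min 1 ((a :: t).length : Int) + 2 * (x : Int)).toNat]?)
          = (fun x => t[2 * x]?) := by
        funext x
        have h1 : (min 1 ((a :: t).length : Int) + 2 * (x : Int)).toNat = 2 * x + 1 := by
          simp [List.length_cons]; omega
        rw [h1]; simp
      rw [hc, hf, filterMap_even]
      rfl -- GOAL?

theorem pymod_two (a : Int) : PySem.Int.mod a 2 = a % 2 := by
  rw [PySem.Int.mod, Int.fmod_eq_emod]; simp

theorem every2_cons {α : Type} (a : α) (t : List α) :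
    every2 (a :: t) = a :: every2 t.tail := by
  cases t <;> rfl

theorem pymod_succ (k : Int) :
    (PySem.Int.mod (k + 1) 2 == 0) = !(PySem.Int.mod k 2 == 0) := by
  rw [pymod_two, pymod_two]
  rcases Int.emod_two_eq k with h | h <;>
    simp [h, show (k+1) % 2 = (k % 2 + 1) % 2 by omega]

def pvG (sum : Int) (p : Int × Char) : Int :=
  if PySem.Int.mod p.1 2 == 0 && p.2 == '$' then sum * 21
  else if p.2 == '$' then sum * 5
  else sum

theorem enumFold_eq (l : List Char) : ∀ (b : Bool) (k acc : Int),
    (PySem.Int.mod k 2 == 0) = b →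
    (PySem.List.enumerate l k).foldl pvG acc
    = acc * 21 ^ ((if b then every2 l else every2 l.tail).count '$')
          * 5 ^ ((if !b then every2 l else every2 l.tail).count '$') := by
  induction l with
  | nil => intro b k acc _; cases b <;> simp [PySem.List.enumerate, every2]
  | cons a t ih =>
      intro b k acc hk
      rw [PySem.List.enumerate_cons, List.foldl_cons,
        ih (!b) (k+1) _ (by rw [pymod_succ, hk])]
      have hG : pvG acc (k, a) =
          if a == '$' then (if b then acc * 21 else acc * 5) else acc := by
        unfold pvG; simp only [hk]
        cases b <;> cases hc : (a == '$') <;> simp [hc]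
      rw [hG]
      cases b <;> cases hc : (a == '$') <;>
        · rw [show every2 (a :: t) = a :: every2 t.tail from every2_cons a t]
          simp [List.count_cons, hc]
          try ring

theorem countStrings_eq_enumFold (s : String) :
    countStrings s = (PySem.List.enumerate s.toList 0).foldl pvG 1 := by
  unfold countStrings
  rw [PySem.List.enumerate_eq_map_pyRange s.toList ' ', List.foldl_map]
  rw [PySem.Str.len_eq, show PySem.List.len s.toList = (s.toList.length : Int) from PySem.List.len_eq _]
  apply PySem.List.foldl_congr_mem
  intro acc i hi
  rcases PySem.List.mem_pyRange_one.mp hi with ⟨h0, h1⟩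
  obtain ⟨n, rfl⟩ : ∃ n : Nat, i = (n : Int) := ⟨i.toNat, by omega⟩
  have hn : n < s.toList.length := by exact_mod_cast h1
  rw [PySem.Str.pyGet?_natCast, List.getElem?_eq_getElem hn,
    show PySem.List.pyGetD s.toList (n : Int) ' ' = s.toList[(n:Int).toNat] from PySem.List.pyGetD_eq_getElem _ ' ' (by omega) (by exact_mod_cast h1)]
  unfold pvG
  simp

-- ===== VERDICT (by name: the statement is the Claim_ definition above) =====
theorem countStrings_spec : Claim_equal_countStrings := by
  intro s _
  unfold Spec_countStrings countStrings_alt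
  rw [slice?_step2_evens, slice?_step2_odds]
  simp only [Option.getD_some]
  rw [countStrings_eq_enumFold,
    enumFold_eq s.toList true 0 1 (by rw [pymod_two]; rfl)]
  simp
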